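-- pv_equiv track=rewrite | github.com/AImenes/Project-Euler | python/problem116.py | blue
-- ===== SOURCE A (Python) =====
-- def blue(length_of_gray_tiles):
-- 	number_of_combinations = [0 for i in range(length_of_gray_tiles+1)]
-- 	for i in range(length_of_gray_tiles+1):
-- 		if i < 4:
-- 			number_of_combinations[i] = 0
-- 		elif i == 4:
-- 			number_of_combinations[i] = 1
-- 		else:
-- 			number_of_combinations[i] = number_of_combinations[i-1] + number_of_combinations[i-4] + 1
-- 	return number_of_combinations[length_of_gray_tiles]
-- ===== SOURCE B (Python) =====
-- # Matrix exponentiation of the augmented recurrence f(i) = f(i-1) + f(i-4) + 1: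
-- # state (f(i), f(i-1), f(i-2), f(i-3), 1) advances by a fixed 5x5 matrix M, so
-- # f(n) = (M^(n-3) v3)[0] with v3 = (0,0,0,0,1); that is row 0, column 4 of M^(n-3).
--
-- def _mat_mul(A, B):
--     return tuple(tuple(sum(A[i][k] * B[k][j] for k in range(5)) for j in range(5)) for i in range(5))
--
-- _IDENT = tuple(tuple(1 if i == j else 0 for j in range(5)) for i in range(5))
--
-- def _mat_pow(M, e):
--     if e == 0:
--         return _IDENT
--     h = _mat_pow(M, e // 2)
--     h2 = _mat_mul(h, h)
--     return h2 if e % 2 == 0 else _mat_mul(h2, M)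
--
-- def blue(length_of_gray_tiles):
--     if length_of_gray_tiles < 4:
--         return 0
--     M = ((1, 0, 0, 1, 1),
--          (1, 0, 0, 0, 0),
--          (0, 1, 0, 0, 0),
--          (0, 0, 1, 0, 0),
--          (0, 0, 0, 0, 1))
--     P = _mat_pow(M, length_of_gray_tiles - 3)
--     return P[0][4]
-- ===== Notes on version B (the rewrite author's own statement) =====
-- stated objective: faster
-- what changed: A fills an O(n) DP table with f(i)=f(i-1)+f(i-4)+1; B computes the same f(n) as entry (0,4) of the (n-3)-th power, by binary exponentiation-by-squaring, of the 5x5 matrix of the augmented linear recurrence.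
import Mathlib
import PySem

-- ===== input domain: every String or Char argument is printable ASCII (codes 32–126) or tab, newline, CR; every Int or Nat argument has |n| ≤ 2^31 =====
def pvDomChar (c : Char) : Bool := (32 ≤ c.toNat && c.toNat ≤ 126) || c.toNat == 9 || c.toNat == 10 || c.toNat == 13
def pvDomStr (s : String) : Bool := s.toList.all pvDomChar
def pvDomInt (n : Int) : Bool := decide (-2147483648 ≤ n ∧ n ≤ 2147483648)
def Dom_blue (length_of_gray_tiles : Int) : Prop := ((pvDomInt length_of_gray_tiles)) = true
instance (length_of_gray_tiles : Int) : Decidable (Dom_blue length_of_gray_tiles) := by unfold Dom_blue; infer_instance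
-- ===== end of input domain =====

-- B replaces A's linear dynamic-programming scan by exponentiation-by-squaring of the 5x5
-- matrix of the augmented recurrence f(i) = f(i-1) + f(i-4) + 1 (objective: faster).

-- ===== PORT A =====
-- the body of A's for-loop; A's index assignments/reads are in range on every admitted
-- input, so the total forms pySetD/pyGetD are exact here
def stepA (a : List Int) (i : Int) : List Int :=
  if i < 4 then PySem.List.pySetD a i 0
  else if i = 4 then PySem.List.pySetD a i 1
  else PySem.List.pySetD a i
    (PySem.List.pyGetD a (i - 1) 0 + PySem.List.pyGetD a (i - 4) 0 + 1)

def blue (length_of_gray_tiles : Int) : Int :=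
  let init : List Int :=
    (PySem.List.pyRange 0 (length_of_gray_tiles + 1) 1).map (fun _ => 0)
  let number_of_combinations :=
    (PySem.List.pyRange 0 (length_of_gray_tiles + 1) 1).foldl stepA init
  PySem.List.pyGetD number_of_combinations length_of_gray_tiles 0

-- ===== PORT B =====
-- Source B's 5-tuples become nested products (Python tuple -> product convention)
abbrev Row5 : Type := Int × Int × Int × Int × Int
abbrev Mat5 : Type := Row5 × Row5 × Row5 × Row5 × Row5

-- one output row of Source B's _mat_mul: the entries sum(A[i][k] * B[k][j] for k in range(5))
-- for j = 0..4, the comprehensions written out over the tuple components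
def mulRow (r : Row5) (B : Mat5) : Row5 :=
  match r, B with
  | (r0, r1, r2, r3, r4),
    ((b00,b01,b02,b03,b04),(b10,b11,b12,b13,b14),(b20,b21,b22,b23,b24),
     (b30,b31,b32,b33,b34),(b40,b41,b42,b43,b44)) =>
    (r0*b00 + r1*b10 + r2*b20 + r3*b30 + r4*b40,
     r0*b01 + r1*b11 + r2*b21 + r3*b31 + r4*b41,
     r0*b02 + r1*b12 + r2*b22 + r3*b32 + r4*b42,
     r0*b03 + r1*b13 + r2*b23 + r3*b33 + r4*b43,
     r0*b04 + r1*b14 + r2*b24 + r3*b34 + r4*b44)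

-- Source B's _mat_mul
def matMul (A B : Mat5) : Mat5 :=
  match A with
  | (a0, a1, a2, a3, a4) => (mulRow a0 B, mulRow a1 B, mulRow a2 B, mulRow a3 B, mulRow a4 B)

-- Source B's _IDENT
def matIdent : Mat5 :=
  ((1,0,0,0,0),(0,1,0,0,0),(0,0,1,0,0),(0,0,0,1,0),(0,0,0,0,1))

-- Source B's _mat_pow
def matPow (M : Mat5) (e : Nat) : Mat5 :=
  if h : e = 0 then matIdent
  else
    let h2 := matMul (matPow M (e / 2)) (matPow M (e / 2))
    if e % 2 = 0 then h2 else matMul h2 M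
termination_by e
decreasing_by all_goals exact Nat.div_lt_self (Nat.pos_of_ne_zero h) one_lt_two

-- the matrix M of Source B's blue
def blueT : Mat5 :=
  ((1, 0, 0, 1, 1),
   (1, 0, 0, 0, 0),
   (0, 1, 0, 0, 0),
   (0, 0, 1, 0, 0),
   (0, 0, 0, 0, 1))

-- P[0][4]
def blue_alt (length_of_gray_tiles : Int) : Int :=
  if length_of_gray_tiles < 4 then 0
  else (matPow blueT (length_of_gray_tiles - 3).toNat).1.2.2.2.2

-- ===== PRECONDITION & SPEC =====
-- Pre_ excludes exactly the negative arguments, on which A's final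
-- number_of_combinations[length_of_gray_tiles] indexes an empty list and raises IndexError.
def Pre_blue (length_of_gray_tiles : Int) : Prop := 0 ≤ length_of_gray_tiles
instance (length_of_gray_tiles : Int) : Decidable (Pre_blue length_of_gray_tiles) := by unfold Pre_blue; infer_instance
def pvWitness_blue : Int := 6

def Spec_blue (length_of_gray_tiles : Int) (out : Int) : Prop := out = blue_alt length_of_gray_tiles
instance (length_of_gray_tiles : Int) (out : Int) : Decidable (Spec_blue length_of_gray_tiles out) := by unfold Spec_blue; infer_instance

-- ===== CLAIM (what is proved, stated in full; the proofs are below) =====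
def Claim_equal_blue : Prop := ∀ (length_of_gray_tiles : Int), Dom_blue length_of_gray_tiles → Pre_blue length_of_gray_tiles → Spec_blue length_of_gray_tiles (blue length_of_gray_tiles)

-- ===== LEMMAS AND PROOFS =====

-- the sequence both programs compute: 0,0,0,0,1 then f(k) = f(k-1) + f(k-4) + 1
def g : Nat → Int
  | 0 => 0 | 1 => 0 | 2 => 0 | 3 => 0 | 4 => 1
  | (k+5) => g (k+4) + g (k+1) + 1

lemma g_rec : ∀ k : Nat, g (k+4) = g (k+3) + g k + 1
  | 0 => by simp [g]
  | (_+1) => by rfl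

lemma g_small (m : Nat) (h : m < 4) : g m = 0 := by
  interval_cases m <;> rfl

-- ----- B side -----
lemma matMul_assoc (A B C : Mat5) : matMul (matMul A B) C = matMul A (matMul B C) := by
  obtain ⟨⟨_,_,_,_,_⟩,⟨_,_,_,_,_⟩,⟨_,_,_,_,_⟩,⟨_,_,_,_,_⟩,_,_,_,_,_⟩ := A
  obtain ⟨⟨_,_,_,_,_⟩,⟨_,_,_,_,_⟩,⟨_,_,_,_,_⟩,⟨_,_,_,_,_⟩,_,_,_,_,_⟩ := B
  obtain ⟨⟨_,_,_,_,_⟩,⟨_,_,_,_,_⟩,⟨_,_,_,_,_⟩,⟨_,_,_,_,_⟩,_,_,_,_,_⟩ := C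
  simp only [matMul, mulRow, Prod.mk.injEq]
  and_intros <;> ring

lemma matIdent_matMul (A : Mat5) : matMul matIdent A = A := by
  obtain ⟨⟨_,_,_,_,_⟩,⟨_,_,_,_,_⟩,⟨_,_,_,_,_⟩,⟨_,_,_,_,_⟩,_,_,_,_,_⟩ := A
  simp only [matMul, matIdent, mulRow, Prod.mk.injEq]
  and_intros <;> ring

lemma matMul_matIdent (A : Mat5) : matMul A matIdent = A := by
  obtain ⟨⟨_,_,_,_,_⟩,⟨_,_,_,_,_⟩,⟨_,_,_,_,_⟩,⟨_,_,_,_,_⟩,_,_,_,_,_⟩ := A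
  simp only [matMul, matIdent, mulRow, Prod.mk.injEq]
  and_intros <;> ring

-- the plain iterated product, reference point between squaring and the recurrence
def matNPow (M : Mat5) : Nat → Mat5
  | 0 => matIdent
  | k+1 => matMul M (matNPow M k)

lemma matNPow_add (M : Mat5) (a b : Nat) :
    matNPow M (a + b) = matMul (matNPow M a) (matNPow M b) := by
  induction a with
  | zero => simp [matNPow, matIdent_matMul]
  | succ a ih =>
    rw [show a + 1 + b = (a + b) + 1 by omega]
    rw [matNPow, ih, matNPow, matMul_assoc]

lemma matNPow_one (M : Mat5) : matNPow M 1 = M := by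
  rw [matNPow, matNPow, matMul_matIdent]

lemma matPow_eq (M : Mat5) (e : Nat) : matPow M e = matNPow M e := by
  induction e using Nat.strong_induction_on with
  | _ e ih =>
    rw [matPow]
    by_cases h : e = 0
    · simp [h, matNPow]
    · have hlt : e / 2 < e := by omega
      rw [dif_neg h]
      simp only [ih (e / 2) hlt]
      by_cases hp : e % 2 = 0
      · rw [if_pos hp, ← matNPow_add]
        congr 1
        omega
      · have h1 := matNPow_add M (e / 2 + e / 2) 1
        rw [matNPow_one] at h1
        rw [if_neg hp, ← matNPow_add, ← h1]
        congr 1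
        omega

-- column 4 of the k-th power carries (f(k+3), f(k+2), f(k+1), f(k), 1)
lemma col4 (k : Nat) :
    (matNPow blueT k).1.2.2.2.2 = g (k+3) ∧ (matNPow blueT k).2.1.2.2.2.2 = g (k+2) ∧
    (matNPow blueT k).2.2.1.2.2.2.2 = g (k+1) ∧ (matNPow blueT k).2.2.2.1.2.2.2.2 = g k ∧
    (matNPow blueT k).2.2.2.2.2.2.2.2 = 1 := by
  induction k with
  | zero => refine ⟨rfl, rfl, rfl, rfl, rfl⟩
  | succ k ih =>
    obtain ⟨h0, h1, h2, h3, h4⟩ := ih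
    refine ⟨?_, ?_, ?_, ?_, ?_⟩ <;>
      · simp only [blueT] at h0 h1 h2 h3 h4
        simp only [matNPow, matMul, mulRow, blueT]
        rw [h0, h1, h2, h3, h4]
        try rw [show k+1+3 = k+4 from rfl, g_rec k]
        ring

lemma blue_alt_eq_g (n : Int) (hn : 0 ≤ n) : blue_alt n = g n.toNat := by
  unfold blue_alt
  by_cases h : n < 4
  · rw [if_pos h, g_small n.toNat (by omega)]
  · rw [if_neg h, matPow_eq, (col4 (n - 3).toNat).1]
    congr 1
    omega

-- ----- A side -----
lemma stepA_inv (a : List Int) (m N : Nat) (hm : m < N) (hlen : a.length = N)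
    (hinv : ∀ j : Nat, j < N → a[j]? = some (if j < m then g j else 0)) :
    (stepA a (m : Int)).length = N ∧
    ∀ j : Nat, j < N → (stepA a (m : Int))[j]? = some (if j < m + 1 then g j else 0) := by
  have hset : ∀ (v : Int), PySem.List.pySetD a (m : Int) v = a.set m v :=
    fun v => PySem.List.pySetD_natCast a m v
  have hgoal : ∀ (v : Int), v = (if m < 4 then 0 else if m = 4 then 1 else g m) →
      (a.set m v).length = N ∧
      ∀ j : Nat, j < N → (a.set m v)[j]? = some (if j < m + 1 then g j else 0) := by
    intro v hv
    constructor
    · simp [hlen]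
    · intro j hj
      rw [List.getElem?_set]
      by_cases hjm : m = j
      · subst hjm
        simp [hlen, hm]
        split_ifs at hv with h1 h2
        · rw [hv, g_small m h1]
        · rw [hv, h2]; rfl
        · exact hv
      · rw [if_neg hjm, hinv j hj]
        congr 1
        have : j < m ↔ j < m + 1 := by omega
        simp [this]
  unfold stepA
  by_cases h4 : m < 4
  · rw [if_pos (by exact_mod_cast h4), hset]
    exact hgoal 0 (by simp [h4])
  · by_cases he : m = 4
    · rw [if_neg (by exact_mod_cast h4), if_pos (by exact_mod_cast congrArg Nat.cast he), hset]
      exact hgoal 1 (by simp [he])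
    · rw [if_neg (by exact_mod_cast h4), if_neg (by simpa using fun h => he (by exact_mod_cast h)), hset]
      have e1 : (m : Int) - 1 = ((m - 1 : Nat) : Int) := by omega
      have e4 : (m : Int) - 4 = ((m - 4 : Nat) : Int) := by omega
      rw [e1, e4, PySem.List.pyGetD_natCast, PySem.List.pyGetD_natCast]
      have g1 : a.getD (m - 1) 0 = g (m - 1) := by
        rw [List.getD_eq_getElem?_getD, hinv (m - 1) (by omega), Option.getD_some,
          if_pos (by omega)]
      have g4 : a.getD (m - 4) 0 = g (m - 4) := by
        rw [List.getD_eq_getElem?_getD, hinv (m - 4) (by omega), Option.getD_some,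
          if_pos (by omega)]
      rw [g1, g4]
      have gm : g m = g (m - 1) + g (m - 4) + 1 := by
        have h := g_rec (m - 4)
        rw [show m - 4 + 4 = m by omega, show m - 4 + 3 = m - 1 by omega] at h
        exact h
      apply hgoal
      rw [if_neg h4, if_neg he, gm]

lemma loopA_inv (N : Nat) (init : List Int) (hlen : init.length = N)
    (hinit : ∀ j : Nat, j < N → init[j]? = some 0) (m : Nat) (hm : m ≤ N) :
    ((PySem.List.pyRange 0 (m : Int) 1).foldl stepA init).length = N ∧
    ∀ j : Nat, j < N →
      ((PySem.List.pyRange 0 (m : Int) 1).foldl stepA init)[j]? = some (if j < m then g j else 0) := by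
  induction m with
  | zero =>
    rw [show ((0:Nat):Int) = 0 by rfl, PySem.List.pyRange_one_eq_nil le_rfl]
    exact ⟨hlen, fun j hj => by simpa using hinit j hj⟩
  | succ m ih =>
    obtain ⟨ihl, ihv⟩ := ih (by omega)
    rw [show ((m+1:Nat):Int) = (m:Int) + 1 by push_cast; ring,
        PySem.List.pyRange_one_succ_right (by positivity), List.foldl_append]
    simpa using stepA_inv _ m N (by omega) ihl ihv

lemma blue_eq_g (n : Int) (hn : 0 ≤ n) : blue n = g n.toNat := by
  unfold blue
  have hN : (n + 1 : Int) = ((n.toNat + 1 : Nat) : Int) := by omega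
  set N := n.toNat + 1 with hNdef
  have hinitlen : ((PySem.List.pyRange 0 (n+1) 1).map (fun _ => (0:Int))).length = N := by
    simp [PySem.List.length_pyRange_one]; omega
  have hinit : ∀ j : Nat, j < N → ((PySem.List.pyRange 0 (n+1) 1).map (fun _ => (0:Int)))[j]? = some 0 := by
    intro j hj
    have hj' : j < ((PySem.List.pyRange 0 (n+1) 1).map (fun _ => (0:Int))).length := by
      rw [hinitlen]; exact hj
    rw [List.getElem?_eq_getElem hj']
    simp
  have key := loopA_inv N _ hinitlen hinit N le_rfl
  rw [hN] at key ⊢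
  obtain ⟨hl, hv⟩ := key
  rw [show n = ((n.toNat : Nat) : Int) by omega, PySem.List.pyGetD_natCast,
      List.getD_eq_getElem?_getD, hv n.toNat (by omega), Option.getD_some, if_pos (by omega)]
  congr 1

-- ===== VERDICT (by name: the statement is the Claim_ definition above) =====
theorem blue_spec : Claim_equal_blue := by
  intro n _ hpre
  unfold Spec_blue
  rw [blue_eq_g n hpre, blue_alt_eq_g n hpre]
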